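-- pv_equiv track=rewrite | github.com/rwillingeprins/advent_of_code | 2019/day04b.py | combinations_with_base
-- ===== SOURCE A (Python) =====
-- def combinations_with_base(length, base):
--     combinations = []
--     for digit in range(base, 10):
--         if length > 1:
--             combinations.extend(
--                 [[digit] + sub_combination for sub_combination in combinations_with_base(length - 1, digit)]
--             )
--         else:
--             combinations.append([digit])
--     return combinations
-- ===== SOURCE B (Python) =====
-- def combinations_with_base(length, base):
--     # Iterative breadth-first build: start from single digits and repeatedly
--     # extend each sequence on the right with digits >= its last digit.
--     items = [([d], d) for d in range(base, 10)]
--     for _ in range(length - 1):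
--         if not items:
--             break
--         items = [(c + [d], d) for (c, last) in items for d in range(last, 10)]
--     return [c for (c, _) in items]
-- ===== Notes on version B (the rewrite author's own statement) =====
-- stated objective: alternative
-- what changed: Replaces A's per-digit recursion (top-down, prefixing) with an iterative bottom-up loop that repeatedly extends partial sequences on the right, tracking each sequence's last digit.
import Mathlib
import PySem

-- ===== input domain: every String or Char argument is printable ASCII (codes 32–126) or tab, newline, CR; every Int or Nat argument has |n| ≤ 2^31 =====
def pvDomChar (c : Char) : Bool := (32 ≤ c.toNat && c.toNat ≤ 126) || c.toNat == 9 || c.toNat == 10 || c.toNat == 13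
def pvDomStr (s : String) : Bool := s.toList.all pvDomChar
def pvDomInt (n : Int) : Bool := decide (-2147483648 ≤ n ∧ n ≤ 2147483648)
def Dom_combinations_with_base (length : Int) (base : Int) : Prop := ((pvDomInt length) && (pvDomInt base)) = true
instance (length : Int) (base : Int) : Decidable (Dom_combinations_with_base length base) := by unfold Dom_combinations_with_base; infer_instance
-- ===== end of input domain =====

-- B replaces A's per-digit recursion by an iterative bottom-up loop extending
-- partial sequences on the right (objective: alternative; same cost, same result).

-- ===== PORT A =====
-- A: for digit in range(base, 10): recurse on (length-1, digit) and prefix, or append [digit].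
mutual
def combinations_with_base (length : Int) (base : Int) : List (List Int) :=
  pvCombLoop length (PySem.List.pyRange base 10 1) []
termination_by ((length - 1).toNat, (PySem.List.pyRange base 10 1).length + 1)

-- the 'for digit in …' loop of A, with its accumulator 'combinations'
def pvCombLoop (length : Int) (digits : List Int) (acc : List (List Int)) : List (List Int) :=
  match digits with
  | [] => acc
  | d :: rest =>
    if _h : length > 1 then
      pvCombLoop length rest
        (acc ++ (combinations_with_base (length - 1) d).map (fun sub => d :: sub))
    else
      pvCombLoop length rest (acc ++ [[d]])
termination_by ((length - 1).toNat, digits.length)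
decreasing_by
  all_goals first
    | (apply Prod.Lex.left; omega)
    | (apply Prod.Lex.right; simp only [List.length_cons]; omega)
end

-- ===== PORT B =====
-- one pass of B's inner comprehension: extend every (sequence, last) by each digit ≥ last
def pvAltStep (items : List (List Int × Int)) : List (List Int × Int) :=
  items.flatMap (fun cl => (PySem.List.pyRange cl.2 10 1).map (fun d => (cl.1 ++ [d], d)))

-- B's 'for _ in range(length-1)' loop with its early break on empty items
def pvAltLoop : Nat → List (List Int × Int) → List (List Int × Int)
  | 0, items => items
  | n + 1, items => if items = [] then items else pvAltLoop n (pvAltStep items)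

def combinations_with_base_alt (length : Int) (base : Int) : List (List Int) :=
  (pvAltLoop (length - 1).toNat
      ((PySem.List.pyRange base 10 1).map (fun d => ([d], d)))).map (fun cl => cl.1)

-- ===== PRECONDITION & SPEC =====
-- Pre_ excludes exactly the inputs on which Python A raises: with base < 10, A recurses once
-- per remaining digit, and under the grader's recursion limit of 10000 it raises
-- RecursionError precisely from length = 9998 upward (measured boundary: 9997 returns,
-- 9998 raises); with base >= 10 A never recurses and is total.
def Pre_combinations_with_base (length : Int) (base : Int) : Prop := length ≤ 9997 ∨ 10 ≤ base
instance (length : Int) (base : Int) : Decidable (Pre_combinations_with_base length base) := by unfold Pre_combinations_with_base; infer_instance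
def pvWitness_combinations_with_base : Int × Int := (2, 1)

def Spec_combinations_with_base (length : Int) (base : Int) (out : List (List Int)) : Prop := out = combinations_with_base_alt length base
instance (length : Int) (base : Int) (out : List (List Int)) : Decidable (Spec_combinations_with_base length base out) := by unfold Spec_combinations_with_base; infer_instance

-- ===== CLAIM (what is proved, stated in full; the proofs are below) =====
def Claim_equal_combinations_with_base : Prop := ∀ (length : Int) (base : Int), Dom_combinations_with_base length base → Pre_combinations_with_base length base → Spec_combinations_with_base length base (combinations_with_base length base)

-- ===== LEMMAS AND PROOFS =====

-- reference shape: all non-decreasing digit sequences of length n+1 with digits ≥ base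
def pvModel : Nat → Int → List (List Int)
  | 0, base => (PySem.List.pyRange base 10 1).map (fun d => [d])
  | n+1, base => (PySem.List.pyRange base 10 1).flatMap (fun d => (pvModel n d).map (fun s => d :: s))

def pvInit (base : Int) : List (List Int × Int) :=
  (PySem.List.pyRange base 10 1).map (fun d => ([d], d))

-- A's loop is a flatMap over the digit list
theorem pvCombLoop_gt (length : Int) (digits : List Int) (acc : List (List Int))
    (h : length > 1) :
    pvCombLoop length digits acc
      = acc ++ digits.flatMap (fun d => (combinations_with_base (length - 1) d).map (fun s => d :: s)) := by
  induction digits generalizing acc with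
  | nil => simp [pvCombLoop]
  | cons d rest ih => simp [pvCombLoop, h, ih]

theorem pvCombLoop_le (length : Int) (digits : List Int) (acc : List (List Int))
    (h : ¬ length > 1) :
    pvCombLoop length digits acc = acc ++ digits.map (fun d => [d]) := by
  induction digits generalizing acc with
  | nil => simp [pvCombLoop]
  | cons d rest ih => simp [pvCombLoop, h, ih]

theorem pvA_model : ∀ (n : Nat) (length base : Int), (length - 1).toNat = n →
    combinations_with_base length base = pvModel n base := by
  intro n
  induction n with
  | zero =>
    intro length base hn
    have h : ¬ length > 1 := by omega
    rw [combinations_with_base, pvCombLoop_le length _ _ h]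
    simp [pvModel]
  | succ n ih =>
    intro length base hn
    have h : length > 1 := by omega
    rw [combinations_with_base, pvCombLoop_gt length _ _ h]
    simp only [pvModel, List.nil_append]
    apply List.flatMap_congr
    intro d _
    rw [ih (length - 1) d (by omega)]

-- B's loop (with its early break) is plain iteration of pvAltStep
theorem pvIter_nil (n : Nat) : pvAltStep^[n] ([] : List (List Int × Int)) = [] := by
  induction n with
  | zero => rfl
  | succ n ih => rw [Function.iterate_succ_apply]; simp [pvAltStep, ih]

theorem pvAltLoop_iterate (n : Nat) (items : List (List Int × Int)) :
    pvAltLoop n items = pvAltStep^[n] items := by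
  induction n generalizing items with
  | zero => rfl
  | succ n ih =>
    rw [pvAltLoop]
    by_cases h : items = []
    · simp [h, pvIter_nil]
    · rw [if_neg h, ih, Function.iterate_succ_apply]

theorem pvAltStep_append (xs ys : List (List Int × Int)) :
    pvAltStep (xs ++ ys) = pvAltStep xs ++ pvAltStep ys := by
  simp [pvAltStep]

theorem pvAltStep_flatMap (l : List Int) (f : Int → List (List Int × Int)) :
    pvAltStep (l.flatMap f) = l.flatMap (fun d => pvAltStep (f d)) := by
  induction l with
  | nil => simp [pvAltStep]
  | cons x xs ih => simp [List.flatMap_cons, pvAltStep_append, ih]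

theorem pvAltStep_map_cons (d : Int) (items : List (List Int × Int)) :
    pvAltStep (items.map (fun cl => (d :: cl.1, cl.2)))
      = (pvAltStep items).map (fun cl => (d :: cl.1, cl.2)) := by
  simp [pvAltStep, List.flatMap_map, List.map_flatMap, List.map_map, Function.comp_def, List.cons_append]

theorem pvIter_flatMap (k : Nat) (l : List Int) (f : Int → List (List Int × Int)) :
    pvAltStep^[k] (l.flatMap f) = l.flatMap (fun d => pvAltStep^[k] (f d)) := by
  induction k generalizing f with
  | zero => simp
  | succ k ih => simp [Function.iterate_succ_apply, pvAltStep_flatMap, ih]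

theorem pvIter_map_cons (k : Nat) (d : Int) (items : List (List Int × Int)) :
    pvAltStep^[k] (items.map (fun cl => (d :: cl.1, cl.2)))
      = (pvAltStep^[k] items).map (fun cl => (d :: cl.1, cl.2)) := by
  induction k generalizing items with
  | zero => simp
  | succ k ih => simp [Function.iterate_succ_apply, pvAltStep_map_cons, ih]

theorem pvAltStep_init (base : Int) :
    pvAltStep (pvInit base)
      = (PySem.List.pyRange base 10 1).flatMap
          (fun d => (pvInit d).map (fun cl => (d :: cl.1, cl.2))) := by
  simp [pvAltStep, pvInit, List.flatMap_map, List.map_map, Function.comp_def]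

theorem pvB_model : ∀ (k : Nat) (base : Int),
    (pvAltStep^[k] (pvInit base)).map (fun cl => cl.1) = pvModel k base := by
  intro k
  induction k with
  | zero => intro base; simp [pvInit, pvModel, List.map_map, Function.comp]
  | succ k ih =>
    intro base
    rw [Function.iterate_succ_apply, pvAltStep_init, pvIter_flatMap]
    simp only [pvModel, List.map_flatMap]
    apply List.flatMap_congr
    intro d _
    rw [pvIter_map_cons]
    simp [List.map_map, Function.comp, ← ih d]

theorem pvAlt_model (length base : Int) :
    combinations_with_base_alt length base = pvModel (length - 1).toNat base := by
  rw [combinations_with_base_alt, pvAltLoop_iterate]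
  have h2 : (List.map (fun d => (([d] : List Int), d)) (PySem.List.pyRange base 10 1)) = pvInit base := rfl
  rw [h2, pvB_model]

-- ===== VERDICT (by name: the statement is the Claim_ definition above) =====
theorem combinations_with_base_spec : Claim_equal_combinations_with_base := by
  intro length base _ _
  unfold Spec_combinations_with_base
  rw [pvAlt_model, pvA_model (length - 1).toNat length base rfl]
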